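-- pv_equiv track=rewrite | github.com/suraj-iitb/algorithm-identification | tbcnn/crawler/data/shell/python3/shell2339870.py | Gmake
-- ===== SOURCE A (Python) =====
-- def Gmake(n):
--  G=[]
--  k = 1
--  while k <= n and len(G) < 100:
--   G.append(k)
--   k = 3 * k + 1
--  G.reverse()
--  return G
-- ===== SOURCE B (Python) =====
-- def Gmake(n):
--     m = 0
--     while m < 100 and (3 ** (m + 1) - 1) // 2 <= n:
--         m += 1
--     return [(3 ** i - 1) // 2 for i in range(m, 0, -1)]
-- ===== Notes on version B (the rewrite author's own statement) =====
-- stated objective: simpler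
-- what changed: Replaces the recurrence loop (k becomes three times k plus one) and the in-place reverse by the closed form for the i-th Knuth gap: count the terms, then emit them directly in descending index order with no reverse step.
import Mathlib
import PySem

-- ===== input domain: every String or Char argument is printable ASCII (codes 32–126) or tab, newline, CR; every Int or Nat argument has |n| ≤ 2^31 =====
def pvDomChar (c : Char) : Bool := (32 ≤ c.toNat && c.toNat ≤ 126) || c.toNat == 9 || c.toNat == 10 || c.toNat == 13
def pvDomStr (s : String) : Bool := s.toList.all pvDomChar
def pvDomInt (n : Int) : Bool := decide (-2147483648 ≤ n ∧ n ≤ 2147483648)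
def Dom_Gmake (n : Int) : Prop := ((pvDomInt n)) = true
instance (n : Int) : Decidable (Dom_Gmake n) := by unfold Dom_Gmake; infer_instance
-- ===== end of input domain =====

-- B replaces A's k=3k+1 recurrence loop and final reverse by the closed form (3^i-1)//2,
-- counting the terms and emitting them directly in descending order (objective: simpler).


-- ===== PORT A =====
-- while k <= n and len(G) < 100: G.append(k); k = 3*k+1   — c is the remaining room 100 - len(G)
def GmakeLoop (n : Int) : Nat → Int → List Int → List Int
  | 0, _, acc => acc
  | c + 1, k, acc => if k ≤ n then GmakeLoop n c (3 * k + 1) (acc ++ [k]) else acc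

def Gmake (n : Int) : List Int :=
  (GmakeLoop n 100 1 []).reverse

-- ===== PORT B =====
-- while m < 100 and (3**(m+1)-1)//2 <= n: m += 1   — c is the remaining room 100 - m
def GmakeCount (n : Int) : Nat → Nat → Nat
  | 0, m => m
  | c + 1, m =>
    if PySem.Int.floordiv (3 ^ (m + 1) - 1) 2 ≤ n then GmakeCount n c (m + 1) else m

-- [(3**i - 1)//2 for i in range(m, 0, -1)]  (every i in the range is ≥ 1, so i.toNat is exact)
def Gmake_alt (n : Int) : List Int :=
  let m := GmakeCount n 100 0
  (PySem.List.pyRange (m : Int) 0 (-1)).map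
    (fun i => PySem.Int.floordiv (3 ^ i.toNat - 1) 2)

-- ===== PRECONDITION & SPEC =====
def Spec_Gmake (n : Int) (out : List Int) : Prop := out = Gmake_alt n
instance (n : Int) (out : List Int) : Decidable (Spec_Gmake n out) := by unfold Spec_Gmake; infer_instance

-- ===== CLAIM (what is proved, stated in full; the proofs are below) =====
def Claim_equal_Gmake : Prop := ∀ (n : Int), Dom_Gmake n → Spec_Gmake n (Gmake n)

-- ===== LEMMAS AND PROOFS =====
-- s i = the i-th Knuth gap (s 0 = 0 is a convenient base): the value A's k takes.
def pvS : Nat → Int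
  | 0 => 0
  | i + 1 => 3 * pvS i + 1

theorem pvS_closed (i : Nat) : 2 * pvS i + 1 = 3 ^ i := by
  induction i with
  | zero => simp [pvS]
  | succ i ih => rw [pow_succ]; simp [pvS]; omega

theorem pvS_floordiv (i : Nat) : PySem.Int.floordiv (3 ^ i - 1) 2 = pvS i := by
  have h := pvS_closed i
  rw [PySem.Int.floordiv_eq_iff_of_pos (by omega)]
  omega

theorem pvCount_ge (n : Int) : ∀ c m, m ≤ GmakeCount n c m := by
  intro c
  induction c with
  | zero => intro m; simp [GmakeCount]
  | succ c ih =>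
    intro m
    simp only [GmakeCount]
    split
    · exact le_trans (Nat.le_succ m) (ih (m + 1))
    · exact le_rfl

theorem pvLoop_eq (n : Int) :
    ∀ c m acc, GmakeLoop n c (pvS (m + 1)) acc =
      acc ++ (List.range' (m + 1) (GmakeCount n c m - m)).map pvS := by
  intro c
  induction c with
  | zero => intro m acc; simp [GmakeLoop, GmakeCount]
  | succ c ih =>
    intro m acc
    simp only [GmakeLoop, GmakeCount, pvS_floordiv (m + 1)]
    split
    · have hk : 3 * pvS (m + 1) + 1 = pvS (m + 2) := rfl
      rw [hk, ih (m + 1)]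
      have hge := pvCount_ge n c (m + 1)
      have hlen : GmakeCount n c (m + 1) - m = (GmakeCount n c (m + 1) - (m + 1)) + 1 := by
        omega
      rw [hlen, List.range'_succ, List.map_cons]
      simp
    · simp

theorem Gmake_eq_closed (n : Int) :
    Gmake n = ((List.range' 1 (GmakeCount n 100 0)).map pvS).reverse := by
  have h := pvLoop_eq n 100 0 []
  norm_num [pvS] at h
  simp [Gmake, h]

theorem Gmake_alt_eq_closed (n : Int) :
    Gmake_alt n = ((List.range' 1 (GmakeCount n 100 0)).map pvS).reverse := by
  show (PySem.List.pyRange ((GmakeCount n 100 0 : Nat) : Int) 0 (-1)).map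
      (fun i => PySem.Int.floordiv (3 ^ i.toNat - 1) 2) = _
  generalize GmakeCount n 100 0 = m
  rw [PySem.List.pyRange_neg_one_eq_reverse]
  have h1 : ((0 : Int) + 1) = (1 : Int) := by ring
  rw [h1, List.map_reverse]
  congr 1
  rw [PySem.List.pyRange_one, List.range'_eq_map_range]
  have h2 : (((m : Int) + 1) - 1).toNat = m := by omega
  rw [h2, List.map_map, List.map_map]
  apply List.map_congr_left
  intro k _
  simp only [Function.comp]
  have h3 : ((1 : Int) + (k : Int)).toNat = k + 1 := by omega
  rw [h3, pvS_floordiv, Nat.add_comm 1 k]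

-- ===== VERDICT (by name: the statement is the Claim_ definition above) =====
theorem Gmake_spec : Claim_equal_Gmake := by
  intro n _
  unfold Spec_Gmake
  rw [Gmake_eq_closed, Gmake_alt_eq_closed]
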